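-- pv_equiv track=rewrite | github.com/iteegi/algoritmicus | algoritmicus/hard/min_rewards.py | min_rewards_1
-- ===== SOURCE A (Python) =====
-- from collections.abc import Sequence
-- from typing import TypeAlias
--
-- Amount_awards: TypeAlias = int
--
-- def min_rewards_1(score: Sequence[int]) -> Amount_awards:
--     """Return the minimum number of rewards you must give away.
--
--     Solution #1
--
--     O(n^2) time | O(n) space
--
--     :param score: List of student grades.
--     :type score: Sequence[int]
--     :return: The minimum number of rewards.
--     :rtype: Amount_awards
--     """
--     rewards = [1 for _ in score]
--     for i in range(1, len(score)):
--         j = i - 1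
--         if score[i] > score[j]:
--             rewards[i] = rewards[j] + 1
--         else:
--             while j >= 0 and score[j] > score[j + 1]:
--                 rewards[j] = max(rewards[j], rewards[j + 1] + 1)
--                 j -= 1
--     return sum(rewards)
-- ===== SOURCE B (Python) =====
-- def min_rewards_1(score):
--     """Minimum rewards: two linear passes (left increasing-run, right
--     decreasing-run), answer is the sum of pointwise maxima. O(n)."""
--     def runs(xs):
--         res = []
--         prev_s = None
--         prev_r = 0
--         for s in xs:
--             r = prev_r + 1 if prev_s is not None and s > prev_s else 1
--             res.append(r)
--             prev_s, prev_r = s, r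
--         return res
--     ups = runs(score)
--     downs = runs(score[::-1])[::-1]
--     return sum(max(u, d) for u, d in zip(ups, downs))
-- ===== Notes on version B (the rewrite author's own statement) =====
-- stated objective: faster
-- what changed: Replaced the O(n^2) backward while-loop repair with two linear passes (increasing-run lengths left-to-right and, via the reversed list, right-to-left) summed pointwise by max.
import Mathlib
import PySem

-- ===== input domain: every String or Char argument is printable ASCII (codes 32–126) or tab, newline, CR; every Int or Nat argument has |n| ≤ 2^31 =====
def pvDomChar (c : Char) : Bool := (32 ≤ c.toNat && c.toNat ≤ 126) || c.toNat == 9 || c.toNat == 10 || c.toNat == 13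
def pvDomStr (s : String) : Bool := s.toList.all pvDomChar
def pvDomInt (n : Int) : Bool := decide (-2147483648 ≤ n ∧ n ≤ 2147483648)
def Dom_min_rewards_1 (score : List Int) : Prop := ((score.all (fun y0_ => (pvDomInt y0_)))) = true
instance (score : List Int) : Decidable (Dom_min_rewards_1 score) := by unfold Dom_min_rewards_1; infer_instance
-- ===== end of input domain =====

-- B replaces A's quadratic backward repair loop by two linear passes (run lengths
-- left-to-right and, via the reversed list, right-to-left) combined pointwise by max.

-- ===== PORT A =====
-- A's inner while loop; the Nat argument is python's j+1 (0 encodes j = -1).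
-- All reads are provably in range during A's run, so list reads are getD _ 0.
def pvAWhile (score : List Int) : List Int → Nat → List Int
  | r, 0 => r
  | r, (m+1) =>
    if score.getD m 0 > score.getD (m+1) 0 then
      pvAWhile score (r.set m (max (r.getD m 0) (r.getD (m+1) 0 + 1))) m
    else r

-- A's outer 'for i in range(1, len(score))' loop.
def pvAFor (score : List Int) (r : List Int) (i : Nat) : List Int :=
  if _h : i < score.length then
    pvAFor score
      (if score.getD i 0 > score.getD (i-1) 0 then r.set i (r.getD (i-1) 0 + 1)
       else pvAWhile score r i)  -- while starts at j = i-1, encoded as fuel i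
      (i+1)
  else r
termination_by score.length - i

def min_rewards_1 (score : List Int) : Int :=
  (pvAFor score (score.map (fun _ => (1:Int))) 1).sum

-- ===== PORT B =====
-- Source B's 'runs' pass: lengths of strictly increasing streaks.
def pvRunsFrom (prevS prevR : Int) : List Int → List Int
  | [] => []
  | s :: rest =>
    let r := if s > prevS then prevR + 1 else 1
    r :: pvRunsFrom s r rest

def pvRuns : List Int → List Int
  | [] => []
  | s :: rest => 1 :: pvRunsFrom s 1 rest

def min_rewards_1_alt (score : List Int) : Int :=
  let ups := pvRuns score
  let downs := (pvRuns score.reverse).reverse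
  (List.zipWith max ups downs).sum

-- ===== PRECONDITION & SPEC =====
def Spec_min_rewards_1 (score : List Int) (out : Int) : Prop := out = min_rewards_1_alt score
instance (score : List Int) (out : Int) : Decidable (Spec_min_rewards_1 score out) := by unfold Spec_min_rewards_1; infer_instance

-- ===== CLAIM (what is proved, stated in full; the proofs are below) =====
def Claim_equal_min_rewards_1 : Prop := ∀ (score : List Int), Dom_min_rewards_1 score → Spec_min_rewards_1 score (min_rewards_1 score)

-- ===== LEMMAS AND PROOFS =====

-- increasing-run length ending at index k
def upF (s : List Int) : Nat → Int
  | 0 => 1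
  | (k+1) => if s.getD (k+1) 0 > s.getD k 0 then upF s k + 1 else 1

-- decreasing-run length starting at index k, limited to g further steps
def dRun (s : List Int) : Nat → Nat → Int
  | _, 0 => 1
  | k, (g+1) => if s.getD k 0 > s.getD (k+1) 0 then dRun s (k+1) g + 1 else 1

theorem upF_pos (s : List Int) : ∀ k, 1 ≤ upF s k := by
  intro k
  induction k with
  | zero => simp [upF]
  | succ k ih =>
    simp only [upF]
    split
    · omega
    · omega

theorem dRun_pos (s : List Int) (g : Nat) : ∀ k, 1 ≤ dRun s k g := by
  induction g with
  | zero => intro k; simp [dRun]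
  | succ g ih =>
    intro k
    simp only [dRun]
    split
    · have := ih (k+1); omega
    · omega

theorem dRun_mono (s : List Int) (g g' : Nat) (h : g ≤ g') : ∀ k, dRun s k g ≤ dRun s k g' := by
  induction g generalizing g' with
  | zero =>
    intro k
    have := dRun_pos s g' k
    simp only [dRun]
    omega
  | succ g ih =>
    intro k
    obtain ⟨h', rfl⟩ : ∃ h', g' = h' + 1 := ⟨g' - 1, by omega⟩
    simp only [dRun]
    split
    · have := ih h' (by omega) (k+1); omega
    · omega

theorem dRun_stable (s : List Int) (j : Nat) (hj : ¬ s.getD j 0 > s.getD (j+1) 0) :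
    ∀ d k g g', j = k + d → d ≤ g → d ≤ g' → dRun s k g = dRun s k g' := by
  intro d
  induction d with
  | zero =>
    intro k g g' hk _ _
    have hkj : k = j := by omega
    subst hkj
    cases g with
    | zero =>
      cases g' with
      | zero => rfl
      | succ b => simp only [dRun]; rw [if_neg hj]
    | succ a =>
      cases g' with
      | zero => simp only [dRun]; rw [if_neg hj]
      | succ b => rw [show dRun s k (a+1) = if s.getD k 0 > s.getD (k+1) 0 then dRun s (k+1) a + 1 else 1 from rfl,
                      show dRun s k (b+1) = if s.getD k 0 > s.getD (k+1) 0 then dRun s (k+1) b + 1 else 1 from rfl,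
                      if_neg hj, if_neg hj]
  | succ d ih =>
    intro k g g' hk hg hg'
    obtain ⟨a, rfl⟩ : ∃ a, g = a + 1 := ⟨g - 1, by omega⟩
    obtain ⟨b, rfl⟩ : ∃ b, g' = b + 1 := ⟨g' - 1, by omega⟩
    simp only [dRun]
    split
    · have := ih (k+1) a b (by omega) (by omega) (by omega); omega
    · rfl

theorem getD_set (l : List Int) (m k : Nat) (v : Int) (h : m < l.length) :
    (l.set m v).getD k 0 = if k = m then v else l.getD k 0 := by
  by_cases hk : k = m
  · subst hk
    rw [if_pos rfl, List.getD_eq_getElem _ _ (by simpa using h)]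
    simp
  · rw [if_neg hk]
    by_cases hlt : k < l.length
    · rw [List.getD_eq_getElem _ _ (by simpa using hlt), List.getD_eq_getElem _ _ hlt]
      rw [List.getElem_set, if_neg (by omega : ¬ m = k)]
    · rw [List.getD_eq_default _ _ (by simpa using (by omega : l.length ≤ k)),
          List.getD_eq_default _ _ (by omega)]

-- the while loop turns the (i-1)-limited run values into i-limited ones
theorem pvAWhile_spec (s : List Int) (i : Nat) (hin : i < s.length) :
    ∀ m r, m ≤ i → r.length = s.length →
      (∀ k, k < m → r.getD k 0 = max (upF s k) (dRun s k (i-1-k))) →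
      (∀ k, m ≤ k → k ≤ i → r.getD k 0 = max (upF s k) (dRun s k (i-k))) →
      (pvAWhile s r m).length = s.length ∧
      (∀ k, k ≤ i → (pvAWhile s r m).getD k 0 = max (upF s k) (dRun s k (i-k))) ∧
      (∀ k, i < k → (pvAWhile s r m).getD k 0 = r.getD k 0) := by
  intro m
  induction m with
  | zero =>
    intro r _ hlen _ h2
    exact ⟨hlen, fun k hk => h2 k (by omega) hk, fun k _ => rfl⟩
  | succ m ih =>
    intro r hmi hlen h1 h2
    simp only [pvAWhile]
    split
    · rename_i hcond
      set v := max (r.getD m 0) (r.getD (m+1) 0 + 1) with hv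
      have hmlen : m < r.length := by omega
      have hset : ∀ t, (r.set m v).getD t 0 = if t = m then v else r.getD t 0 :=
        fun t => getD_set r m t v hmlen
      have hup1 : upF s (m+1) = 1 := by
        simp only [upF]; rw [if_neg (by omega)]
      have hrm1 : r.getD (m+1) 0 = dRun s (m+1) (i-(m+1)) := by
        rw [h2 (m+1) (by omega) (by omega), hup1]
        have := dRun_pos s (i-(m+1)) (m+1); omega
      have hstep : dRun s m (i-m) = dRun s (m+1) (i-(m+1)) + 1 := by
        obtain ⟨a, ha⟩ : ∃ a, i - m = a + 1 := ⟨i - m - 1, by omega⟩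
        rw [ha]
        simp only [dRun]
        rw [if_pos hcond]
        congr 2
        omega
      have hvm : v = max (upF s m) (dRun s m (i-m)) := by
        rw [hv, hrm1, h1 m (by omega)]
        have hmono := dRun_mono s (i-1-m) (i-m) (by omega) m
        have := upF_pos s m
        have := dRun_pos s (i-(m+1)) (m+1)
        omega
      have hres := ih (r.set m v) (by omega) (by simpa using hlen)
        (fun k hk => by rw [hset k, if_neg (by omega)]; exact h1 k (by omega))
        (fun k hk1 hk2 => by
          by_cases hk : k = m
          · subst hk; rw [hset k, if_pos rfl]; exact hvm
          · rw [hset k, if_neg hk]; exact h2 k (by omega) hk2)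
      refine ⟨hres.1, hres.2.1, fun k hk => ?_⟩
      rw [hres.2.2 k hk, hset k, if_neg (by omega)]
    · rename_i hcond
      refine ⟨hlen, fun k hk => ?_, fun k _ => rfl⟩
      rcases Nat.lt_or_ge k (m+1) with hk' | hk'
      · rw [h1 k hk']
        congr 1
        exact dRun_stable s m hcond (m - k) k (i-1-k) (i-k) (by omega) (by omega) (by omega)
      · exact h2 k hk' hk

-- the outer for loop establishes the full-list run values
theorem pvAFor_spec (s : List Int) :
    ∀ fuel i r, s.length - i ≤ fuel → 1 ≤ i → i ≤ s.length → r.length = s.length →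
      (∀ k, k < i → r.getD k 0 = max (upF s k) (dRun s k (i-1-k))) →
      (∀ k, i ≤ k → k < s.length → r.getD k 0 = 1) →
      (pvAFor s r i).length = s.length ∧
      (∀ k, k < s.length → (pvAFor s r i).getD k 0 = max (upF s k) (dRun s k (s.length-1-k))) := by
  intro fuel
  induction fuel with
  | zero =>
    intro i r hfuel h1i hin hlen hinv _
    rw [pvAFor, dif_neg (by omega : ¬ i < s.length)]
    exact ⟨hlen, fun k hk => by rw [hinv k (by omega)]; congr 2; omega⟩
  | succ fuel ih =>
    intro i r hfuel h1i hin hlen hinv hones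
    by_cases hlt : i < s.length
    · rw [pvAFor, dif_pos hlt]
      obtain ⟨i', rfl⟩ : ∃ i', i = i' + 1 := ⟨i - 1, by omega⟩
      split
      · rename_i hcond
        simp only [Nat.add_sub_cancel] at hcond
        have hncond : ¬ s.getD i' 0 > s.getD (i'+1) 0 := by omega
        have hilen : i' + 1 < r.length := by omega
        have hset : ∀ t, (r.set (i'+1) (r.getD (i'+1-1) 0 + 1)).getD t 0 =
            if t = i'+1 then r.getD (i'+1-1) 0 + 1 else r.getD t 0 :=
          fun t => getD_set r (i'+1) t _ hilen
        have hvval : r.getD (i'+1-1) 0 + 1 = max (upF s (i'+1)) (dRun s (i'+1) 0) := by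
          simp only [Nat.add_sub_cancel]
          rw [hinv i' (by omega)]
          have hd : dRun s i' (i'+1-1-i') = 1 := by
            have he : i'+1-1-i' = 0 := by omega
            rw [he]; exact rfl
          have hu : upF s (i'+1) = upF s i' + 1 := by
            simp only [upF]; rw [if_pos hcond]
          have h01 : dRun s (i'+1) 0 = 1 := rfl
          have := upF_pos s i'
          rw [hd, hu]
          omega
        apply ih (i'+2) _ (by omega) (by omega) (by omega) (by simpa using hlen)
        · intro k hk
          by_cases hke : k = i'+1
          · rw [hke, hset (i'+1), if_pos rfl, hvval]
            congr 2
            omega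
          · rw [hset k, if_neg hke, hinv k (by omega)]
            congr 1
            exact dRun_stable s i' hncond (i'-k) k (i'+1-1-k) (i'+2-1-k) (by omega) (by omega) (by omega)
        · intro k hk1 hk2
          rw [hset k, if_neg (by omega)]
          exact hones k (by omega) hk2
      · rename_i hcond
        simp only [Nat.add_sub_cancel] at hcond
        have hw := pvAWhile_spec s (i'+1) hlt (i'+1) r (by omega) hlen
          (fun k hk => hinv k hk)
          (fun k hk1 hk2 => by
            have hke : k = i'+1 := by omega
            rw [hke, hones (i'+1) (by omega) (by omega)]
            have hu : upF s (i'+1) = 1 := by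
              simp only [upF]; rw [if_neg (by omega)]
            have hd : dRun s (i'+1) (i'+1-(i'+1)) = 1 := by
              have he : i'+1-(i'+1) = 0 := by omega
              rw [he]; exact rfl
            rw [hu, hd]
            omega)
        apply ih (i'+2) _ (by omega) (by omega) (by omega) hw.1
        · intro k hk
          rw [hw.2.1 k (by omega)]
          have he2 : i'+2-1-k = i'+1-k := by omega
          rw [he2]
        · intro k hk1 hk2
          rw [hw.2.2 k (by omega)]
          exact hones k (by omega) hk2
    · rw [pvAFor, dif_neg hlt]
      exact ⟨hlen, fun k hk => by rw [hinv k (by omega)]; congr 2; omega⟩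

theorem sum_eq_range (l : List Int) : l.sum = ∑ k ∈ Finset.range l.length, l.getD k 0 := by
  induction l with
  | nil => simp
  | cons a t ih =>
    simp only [List.sum_cons, List.length_cons]
    rw [Finset.sum_range_succ', ih]
    simp only [List.getD_cons_succ, List.getD_cons_zero]
    ring

theorem pvRunsFrom_length (p q : Int) (l : List Int) : (pvRunsFrom p q l).length = l.length := by
  induction l generalizing p q with
  | nil => rfl
  | cons a t ih => simp [pvRunsFrom, ih]

theorem pvRuns_length (l : List Int) : (pvRuns l).length = l.length := by
  cases l with
  | nil => rfl
  | cons a t => simp [pvRuns, pvRunsFrom_length]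

theorem pvRunsFrom_spec (s : List Int) :
    ∀ k j, j + 1 + k < s.length →
      (pvRunsFrom (s.getD j 0) (upF s j) (s.drop (j+1))).getD k 0 = upF s (j+1+k) := by
  intro k
  induction k with
  | zero =>
    intro j hj
    rw [List.drop_eq_getElem_cons (show j+1 < s.length by omega)]
    simp only [pvRunsFrom, List.getD_cons_zero]
    have hg : s[j+1] = s.getD (j+1) 0 := (List.getD_eq_getElem s 0 (by omega)).symm
    rw [hg]
    simp only [upF]
  | succ k ih =>
    intro j hj
    rw [List.drop_eq_getElem_cons (show j+1 < s.length by omega)]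
    simp only [pvRunsFrom, List.getD_cons_succ]
    have hg : s[j+1] = s.getD (j+1) 0 := (List.getD_eq_getElem s 0 (by omega)).symm
    have hr : (if s[j+1] > s.getD j 0 then upF s j + 1 else 1) = upF s (j+1) := by
      rw [hg]; simp only [upF]
    rw [hg]
    rw [show (if s.getD (j+1) 0 > s.getD j 0 then upF s j + 1 else 1) = upF s (j+1) from by simp only [upF]]
    rw [ih (j+1) (by omega)]
    congr 1
    omega

theorem pvRuns_spec (s : List Int) : ∀ k, k < s.length → (pvRuns s).getD k 0 = upF s k := by
  intro k hk
  cases s with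
  | nil => simp at hk
  | cons a t =>
    cases k with
    | zero => simp [pvRuns, upF]
    | succ k =>
      simp only [pvRuns, List.getD_cons_succ]
      have h := pvRunsFrom_spec (a :: t) k 0 (by simp only [List.length_cons] at hk ⊢; omega)
      rw [show (0:Nat)+1+k = k+1 by omega] at h
      exact h

theorem upF_reverse (s : List Int) :
    ∀ m k, k < s.length → m = s.length - 1 - k →
      upF s.reverse m = dRun s k (s.length - 1 - k) := by
  intro m
  induction m with
  | zero =>
    intro k hk hm
    rw [show s.length - 1 - k = 0 by omega]
    rfl
  | succ m ih =>
    intro k hk hm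
    have hk1 : k + 1 < s.length := by omega
    have hrev : ∀ j, j < s.length → s.reverse.getD j 0 = s.getD (s.length - 1 - j) 0 := by
      intro j hj
      rw [List.getD_eq_getElem _ _ (by simpa using hj), List.getD_eq_getElem _ _ (by omega)]
      simp [List.getElem_reverse]
    have h1 : s.reverse.getD (m+1) 0 = s.getD k 0 := by
      rw [hrev (m+1) (by omega)]
      congr 1
      omega
    have h2 : s.reverse.getD m 0 = s.getD (k+1) 0 := by
      rw [hrev m (by omega)]
      congr 1
      omega
    rw [show s.length - 1 - k = m + 1 by omega]
    simp only [upF, dRun, h1, h2]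
    split
    · rw [ih (k+1) (by omega) (by omega)]
      congr 2
      omega
    · rfl

theorem alt_eq_sum (s : List Int) :
    min_rewards_1_alt s =
      ∑ k ∈ Finset.range s.length, max (upF s k) (dRun s k (s.length - 1 - k)) := by
  unfold min_rewards_1_alt
  have hlu : (pvRuns s).length = s.length := pvRuns_length s
  have hld : ((pvRuns s.reverse).reverse).length = s.length := by
    simp [pvRuns_length]
  have hlen : (List.zipWith max (pvRuns s) (pvRuns s.reverse).reverse).length = s.length := by
    simp [hlu, hld]
  rw [sum_eq_range, hlen]
  apply Finset.sum_congr rfl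
  intro k hk
  simp only [Finset.mem_range] at hk
  rw [List.getD_eq_getElem _ _ (by omega), List.getElem_zipWith]
  congr 1
  · rw [← List.getD_eq_getElem _ _ (by omega)]
    exact pvRuns_spec s k hk
  · rw [List.getElem_reverse]
    have hkr : (pvRuns s.reverse).length - 1 - k < (pvRuns s.reverse).length := by
      simp [pvRuns_length]; omega
    rw [← List.getD_eq_getElem _ _ hkr]
    have hsr : (pvRuns s.reverse).length - 1 - k = s.length - 1 - k := by
      simp [pvRuns_length]
    rw [hsr, pvRuns_spec s.reverse _ (by simp [List.length_reverse]; omega)]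
    exact upF_reverse s (s.length - 1 - k) k hk rfl

-- ===== VERDICT (by name: the statement is the Claim_ definition above) =====
theorem min_rewards_1_spec : Claim_equal_min_rewards_1 := by
  intro s _
  unfold Spec_min_rewards_1
  rw [alt_eq_sum]
  unfold min_rewards_1
  rcases Nat.eq_zero_or_pos s.length with h0 | hpos
  · have hnil : s = [] := by cases s <;> simp_all
    subst hnil
    simp [pvAFor]
  · have hones : (s.map (fun _ => (1:Int))).length = s.length := by simp
    have hmain := pvAFor_spec s (s.length - 1) 1 (s.map (fun _ => (1:Int)))
      (by omega) (by omega) (by omega) hones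
      (by
        intro k hk
        have hke : k = 0 := by omega
        subst hke
        rw [List.getD_eq_getElem _ _ (by simpa using hpos)]
        simp [upF, dRun])
      (by
        intro k _ hk2
        rw [List.getD_eq_getElem _ _ (by simpa using hk2)]
        simp)
    rw [sum_eq_range, hmain.1]
    exact Finset.sum_congr rfl (fun k hk => hmain.2 k (Finset.mem_range.mp hk))
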